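-- pv_equiv track=rewrite | github.com/Fynardo/AoC2k19 | day12/moons.py | predict_axis_loop
-- ===== SOURCE A (Python) =====
-- def f(x, y):
--     if x < y:
--         return 1
--     elif x == y:
--         return 0
--     elif x > y:
--         return -1
--
-- def update_axis_gravity(positions):
--     gravity = [0]*len(positions)
--     for i, _ in enumerate(positions):
--         gravity[i] = sum([f(positions[i], positions[k]) for k in range(len(positions))])
--     return gravity
--
-- def apply_axis_gravity(velocity, gravity):
--     for i in range(len(velocity)):
--         velocity[i] += gravity[i]
--
-- def apply_axis_velocity(velocity, positions):
--     for i in range(len(velocity)):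
--         positions[i] = positions[i] + velocity[i]
--
-- def simulate_axis(positions, velocity, steps):
--     for step in range(steps):
--         gravity = update_axis_gravity(positions)
--         apply_axis_gravity(velocity, gravity)
--         apply_axis_velocity(velocity, positions)
--
--     return positions
--
-- def predict_axis_loop(axis_positions, axis_velocity):
--     initial_positions = axis_positions[:]
--     initial_velocity = axis_velocity[:]
--
--     cicles = 1
--     while True:
--         simulate_axis(axis_positions, axis_velocity, steps=1)
--         if axis_positions == initial_positions and axis_velocity == initial_velocity:
--             return cicles
--         cicles += 1
-- ===== SOURCE B (Python) =====
-- def predict_axis_loop(axis_positions, axis_velocity):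
--     initial_positions = list(axis_positions)
--     initial_velocity = list(axis_velocity)
--     cicles = 1
--     while True:
--         asc = sorted(axis_positions)
--         desc = sorted(axis_positions, reverse=True)
--         for i in range(len(axis_velocity)):
--             x = axis_positions[i]
--             # gravity = (# positions strictly greater) - (# positions strictly less)
--             axis_velocity[i] += desc.index(x) - asc.index(x)
--         for i in range(len(axis_velocity)):
--             axis_positions[i] += axis_velocity[i]
--         if axis_positions == initial_positions and axis_velocity == initial_velocity:
--             return cicles
--         cicles += 1
-- ===== Notes on version B (the rewrite author's own statement) =====
-- stated objective: alternative
-- what changed: Each step's gravity is read off two sorted copies of the positions -- first-occurrence index in the descending copy (count strictly greater) minus first-occurrence index in the ascending copy (count strictly less) -- instead of A's per-moon pairwise sign-sum over all moon pairs.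
import Mathlib
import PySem

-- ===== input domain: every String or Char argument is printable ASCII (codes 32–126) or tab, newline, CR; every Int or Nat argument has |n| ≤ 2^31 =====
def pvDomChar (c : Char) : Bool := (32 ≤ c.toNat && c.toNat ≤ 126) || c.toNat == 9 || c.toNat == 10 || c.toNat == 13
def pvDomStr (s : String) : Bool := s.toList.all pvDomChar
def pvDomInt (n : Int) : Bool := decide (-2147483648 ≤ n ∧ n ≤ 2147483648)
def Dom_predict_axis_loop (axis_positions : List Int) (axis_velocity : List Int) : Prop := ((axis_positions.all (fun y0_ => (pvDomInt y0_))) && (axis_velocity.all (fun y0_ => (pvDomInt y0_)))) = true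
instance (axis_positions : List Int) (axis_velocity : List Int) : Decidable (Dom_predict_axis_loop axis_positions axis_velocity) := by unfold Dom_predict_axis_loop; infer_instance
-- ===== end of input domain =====

-- B computes each step's gravity from sorted copies of the positions (first-occurrence
-- indices give the strictly-greater / strictly-less counts) instead of A's pairwise sign
-- sums; equivalence is about the return value (both Pythons mutate their list arguments
-- the same way).


-- ===== PORT A =====
-- f(x, y)
def pvF (x y : Int) : Int := if x < y then 1 else if x = y then 0 else -1

-- update_axis_gravity: Python runs i, k over range(len(positions)) and reads
-- positions[i], positions[k]; mapped over the elements these are the same values in the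
-- same order.
def pvUpdateAxisGravity (positions : List Int) : List Int :=
  positions.map (fun p => (positions.map (fun q => pvF p q)).sum)

-- apply_axis_gravity: velocity[i] += gravity[i] for i in range(len(velocity))
-- (Python raises IndexError when len(gravity) < len(velocity); those inputs are outside Pre_)
def pvApplyAxisGravity (velocity gravity : List Int) : List Int :=
  (List.range velocity.length).map
    (fun (i : Nat) => PySem.List.pyGetD velocity (i : Int) 0 + PySem.List.pyGetD gravity (i : Int) 0)

-- apply_axis_velocity: positions[i] = positions[i] + velocity[i] for i in range(len(velocity));
-- entries of positions beyond len(velocity) keep their value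
def pvApplyAxisVelocity (velocity positions : List Int) : List Int :=
  (List.range positions.length).map
    (fun (i : Nat) => if i < velocity.length then
                PySem.List.pyGetD positions (i : Int) 0 + PySem.List.pyGetD velocity (i : Int) 0
              else PySem.List.pyGetD positions (i : Int) 0)

-- body of simulate_axis's for-loop (one step); simulate_axis folds it `steps` times
def pvSimStepA (pv : List Int × List Int) : List Int × List Int :=
  let gravity := pvUpdateAxisGravity pv.1
  let velocity := pvApplyAxisGravity pv.2 gravity
  let positions := pvApplyAxisVelocity velocity pv.1
  (positions, velocity)

def pvSimulateAxis (pv : List Int × List Int) (steps : Nat) : List Int × List Int :=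
  (List.range steps).foldl (fun s _ => pvSimStepA s) pv

-- while True: a fuel bound makes the loop a total Lean function; both ports use the same
-- bound, and the equivalence theorem does not depend on it
def pvLoopA (fuel : Nat) (p v ip iv : List Int) (cicles : Int) : Int :=
  match fuel with
  | 0 => cicles
  | fuel + 1 =>
    let s := pvSimulateAxis (p, v) 1
    if s.1 = ip ∧ s.2 = iv then cicles else pvLoopA fuel s.1 s.2 ip iv (cicles + 1)

def predict_axis_loop (axis_positions : List Int) (axis_velocity : List Int) : Int :=
  pvLoopA 4294967296 axis_positions axis_velocity axis_positions axis_velocity 1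

-- ===== PORT B =====
-- one iteration of B's while-loop: gravity from the two sorted copies
def pvStepB (p v : List Int) : List Int × List Int :=
  let asc := PySem.List.sorted p (fun z => z) false
  let desc := PySem.List.sorted p (fun z => z) true
  let v' := (List.range v.length).map
    (fun (i : Nat) =>
      let x := PySem.List.pyGetD p (i : Int) 0
      PySem.List.pyGetD v (i : Int) 0 +
        (((PySem.List.index? desc x).getD 0 : Nat) : Int) -
        (((PySem.List.index? asc x).getD 0 : Nat) : Int))
  let p' := (List.range p.length).map
    (fun (i : Nat) => if i < v'.length then
                PySem.List.pyGetD p (i : Int) 0 + PySem.List.pyGetD v' (i : Int) 0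
              else PySem.List.pyGetD p (i : Int) 0)
  (p', v')

def pvLoopB (fuel : Nat) (p v ip iv : List Int) (cicles : Int) : Int :=
  match fuel with
  | 0 => cicles
  | fuel + 1 =>
    let s := pvStepB p v
    if s.1 = ip ∧ s.2 = iv then cicles else pvLoopB fuel s.1 s.2 ip iv (cicles + 1)

def predict_axis_loop_alt (axis_positions : List Int) (axis_velocity : List Int) : Int :=
  pvLoopB 4294967296 axis_positions axis_velocity axis_positions axis_velocity 1

-- ===== PRECONDITION & SPEC =====
-- Pre_ excludes exactly the inputs with len(axis_velocity) > len(axis_positions), on which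
-- Python A raises IndexError. Note A's loop never returns at all when the velocities do not
-- cancel out (the state drifts forever), e.g. at ([0],[1]), ([0],[2]), ([0],[-1]), ([1],[1]),
-- ([2],[1]), ([3],[1]), ([0,0],[1,1]), ([0,1],[1,1]); such inputs stay inside Pre_ (A raises
-- nothing there) and the fuel-bounded ports are proved equal on all of Pre_.
def Pre_predict_axis_loop (axis_positions : List Int) (axis_velocity : List Int) : Prop :=
  axis_velocity.length ≤ axis_positions.length

instance (axis_positions : List Int) (axis_velocity : List Int) :
    Decidable (Pre_predict_axis_loop axis_positions axis_velocity) := by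
  unfold Pre_predict_axis_loop; infer_instance

def pvWitness_predict_axis_loop : List Int × List Int := ([0, 10, -7, 4], [1, 1, 1, 1])

def Spec_predict_axis_loop (axis_positions : List Int) (axis_velocity : List Int) (out : Int) : Prop :=
  out = predict_axis_loop_alt axis_positions axis_velocity
instance (axis_positions : List Int) (axis_velocity : List Int) (out : Int) :
    Decidable (Spec_predict_axis_loop axis_positions axis_velocity out) := by
  unfold Spec_predict_axis_loop; infer_instance

-- ===== CLAIM (what is proved, stated in full; the proofs are below) =====
def Claim_equal_predict_axis_loop : Prop := ∀ (axis_positions : List Int) (axis_velocity : List Int), Dom_predict_axis_loop axis_positions axis_velocity → Pre_predict_axis_loop axis_positions axis_velocity → Spec_predict_axis_loop axis_positions axis_velocity (predict_axis_loop axis_positions axis_velocity)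

-- ===== LEMMAS AND PROOFS =====

theorem pv_sumF (x : Int) (l : List Int) :
    (l.map (fun q => pvF x q)).sum =
      (l.countP (fun y => decide (x < y)) : Int) - (l.countP (fun y => decide (y < x)) : Int) := by
  induction l with
  | nil => simp
  | cons a t ih =>
    simp only [List.map_cons, List.sum_cons, List.countP_cons, ih]
    rcases lt_trichotomy x a with h | h | h
    · simp [pvF, h, not_lt.mpr h.le]
      omega
    · subst h
      simp [pvF]
    · simp [pvF, h, not_lt.mpr h.le]
      omega

-- first-occurrence index of x in an ascending list = number of elements strictly below x
theorem pv_index_asc (s : List Int) (x : Int)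
    (hs : s.Pairwise (· ≤ ·)) (hx : x ∈ s) :
    PySem.List.index? s x = some (s.countP (fun y => decide (y < x))) := by
  induction s with
  | nil => cases hx
  | cons a t ih =>
    rcases List.pairwise_cons.mp hs with ⟨ha, ht⟩
    by_cases hax : a = x
    · subst hax
      have hzero : t.countP (fun y => decide (y < a)) = 0 := by
        rw [List.countP_eq_zero]
        intro y hy
        simpa using not_lt.mpr (ha y hy)
      simp [PySem.List.index?, List.idxOf?_cons, hzero]
    · rw [List.mem_cons] at hx
      have hxt : x ∈ t := hx.resolve_left (fun h => hax h.symm)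
      have hax' : a < x := lt_of_le_of_ne (ha x hxt) hax
      have hrec := ih ht hxt
      simp only [PySem.List.index?] at hrec ⊢
      simp [List.idxOf?_cons, hax, hrec, hax']

-- first-occurrence index of x in a descending list = number of elements strictly above x
theorem pv_index_desc (s : List Int) (x : Int)
    (hs : s.Pairwise (fun a b => b ≤ a)) (hx : x ∈ s) :
    PySem.List.index? s x = some (s.countP (fun y => decide (x < y))) := by
  induction s with
  | nil => cases hx
  | cons a t ih =>
    rcases List.pairwise_cons.mp hs with ⟨ha, ht⟩
    by_cases hax : a = x
    · subst hax
      have hzero : t.countP (fun y => decide (a < y)) = 0 := by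
        rw [List.countP_eq_zero]
        intro y hy
        simpa using not_lt.mpr (ha y hy)
      simp [PySem.List.index?, List.idxOf?_cons, hzero]
    · rw [List.mem_cons] at hx
      have hxt : x ∈ t := hx.resolve_left (fun h => hax h.symm)
      have hax' : x < a := lt_of_le_of_ne (ha x hxt) (Ne.symm hax)
      have hrec := ih ht hxt
      simp only [PySem.List.index?] at hrec ⊢
      simp [List.idxOf?_cons, hax, hrec, hax']

-- one simulation step of port A equals one step of port B whenever len v ≤ len p
theorem pv_step_eq (p v : List Int) (h : v.length ≤ p.length) :
    pvSimStepA (p, v) = pvStepB p v := by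
  have hasc : (PySem.List.sorted p (fun z => z) false).Pairwise (fun a b => a ≤ b) :=
    PySem.List.sorted_pairwise p (fun z => z)
  have hdesc : (PySem.List.sorted p (fun z => z) true).Pairwise (fun a b => b ≤ a) :=
    PySem.List.sorted_pairwise_rev p (fun z => z)
  have hglen : (pvUpdateAxisGravity p).length = p.length := by
    simp [pvUpdateAxisGravity]
  have hveq : pvApplyAxisGravity v (pvUpdateAxisGravity p) =
      (List.range v.length).map
        (fun (i : Nat) =>
          let x := PySem.List.pyGetD p (i : Int) 0
          PySem.List.pyGetD v (i : Int) 0 +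
            (((PySem.List.index? (PySem.List.sorted p (fun z => z) true) x).getD 0 : Nat) : Int) -
            (((PySem.List.index? (PySem.List.sorted p (fun z => z) false) x).getD 0 : Nat) : Int)) := by
    apply List.ext_getElem
    · simp [pvApplyAxisGravity]
    · intro i h1 h2
      have hi : i < v.length := by simpa [pvApplyAxisGravity] using h1
      have hip : i < p.length := lt_of_lt_of_le hi h
      simp only [pvApplyAxisGravity, List.getElem_map, List.getElem_range]
      rw [PySem.List.pyGetD_natCast p, List.getD_eq_getElem _ _ hip,
          PySem.List.pyGetD_natCast (pvUpdateAxisGravity p),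
          List.getD_eq_getElem _ _ (by omega : i < (pvUpdateAxisGravity p).length)]
      have hmp : p[i] ∈ p := List.getElem_mem hip
      have hma : p[i] ∈ PySem.List.sorted p (fun z => z) false :=
        (PySem.List.mem_sorted _ _ _ _).mpr hmp
      have hmd : p[i] ∈ PySem.List.sorted p (fun z => z) true :=
        (PySem.List.mem_sorted _ _ _ _).mpr hmp
      rw [pv_index_asc _ _ hasc hma, pv_index_desc _ _ hdesc hmd]
      rw [((PySem.List.sorted_perm p (fun z => z) false).countP_eq _),
          ((PySem.List.sorted_perm p (fun z => z) true).countP_eq _)]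
      simp only [pvUpdateAxisGravity, List.getElem_map, pv_sumF, Option.getD_some]
      omega
  show (_, _) = (_, _)
  simp only [pvApplyAxisVelocity, ← hveq]

theorem pv_stepB_len₁ (p v : List Int) : (pvStepB p v).1.length = p.length := by
  simp [pvStepB]

theorem pv_stepB_len₂ (p v : List Int) : (pvStepB p v).2.length = v.length := by
  simp [pvStepB]

theorem pv_loop_eq (fuel : Nat) (p v ip iv : List Int) (c : Int)
    (h : v.length ≤ p.length) :
    pvLoopA fuel p v ip iv c = pvLoopB fuel p v ip iv c := by
  induction fuel generalizing p v c with
  | zero => rfl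
  | succ f ih =>
    have hs : pvSimulateAxis (p, v) 1 = pvStepB p v := by
      rw [← pv_step_eq p v h]
      simp [pvSimulateAxis, List.range_succ]
    rw [pvLoopA, pvLoopB, hs]
    split_ifs with hcmp
    · rfl
    · exact ih _ _ _ (by rw [pv_stepB_len₁, pv_stepB_len₂]; exact h)

theorem predict_axis_loop_spec : Claim_equal_predict_axis_loop := by
  intro p v _hdom hpre
  unfold Spec_predict_axis_loop predict_axis_loop predict_axis_loop_alt
  exact pv_loop_eq _ p v p v 1 hpre
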